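-- pv_equiv track=rewrite | github.com/pproenca/wtfui | src/flow/compiler/analyzer.py | _matches_indicator
-- ===== SOURCE A (Python) =====
-- def _matches_indicator(import_name: str, indicators: frozenset[str]) -> bool:
--     """Check if import matches any indicator.
--
--     Handles both exact matches and prefix matches for nested modules.
--
--     Args:
--         import_name: Imported module name
--         indicators: Set of indicator patterns
--
--     Returns:
--         True if import matches any indicator
--     """
--     if import_name in indicators:
--         return True
--
--     # Check if it's a submodule of an indicator
--     for indicator in indicators:
--         if import_name.startswith(f"{indicator}."):
--             return True
--         if indicator.startswith(f"{import_name}."):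
--             return True
--
--     return False
-- ===== SOURCE B (Python) =====
-- def _matches_indicator(import_name: str, indicators: frozenset[str]) -> bool:
--     """Ancestor-prefix formulation: collect every prefix of import_name that ends
--     at a dot boundary (plus the full name) and test those against the indicator
--     set; only the reverse (indicator-is-submodule) case still scans indicators."""
--     prefixes = [import_name[:i] for i, ch in enumerate(import_name) if ch == '.']
--     prefixes.append(import_name)
--     if any(p in indicators for p in prefixes):
--         return True
--     dotted = import_name + '.'
--     return any(ind.startswith(dotted) for ind in indicators)
-- ===== Notes on version B (the rewrite author's own statement) =====
-- stated objective: faster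
-- what changed: Replaces the forward startswith-scan over all indicators by building the dot-boundary ancestor prefixes of import_name once and testing those for O(1) membership in the indicator frozenset; only the reverse (indicator-is-submodule-of-import) case still scans indicators.
import Mathlib
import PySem

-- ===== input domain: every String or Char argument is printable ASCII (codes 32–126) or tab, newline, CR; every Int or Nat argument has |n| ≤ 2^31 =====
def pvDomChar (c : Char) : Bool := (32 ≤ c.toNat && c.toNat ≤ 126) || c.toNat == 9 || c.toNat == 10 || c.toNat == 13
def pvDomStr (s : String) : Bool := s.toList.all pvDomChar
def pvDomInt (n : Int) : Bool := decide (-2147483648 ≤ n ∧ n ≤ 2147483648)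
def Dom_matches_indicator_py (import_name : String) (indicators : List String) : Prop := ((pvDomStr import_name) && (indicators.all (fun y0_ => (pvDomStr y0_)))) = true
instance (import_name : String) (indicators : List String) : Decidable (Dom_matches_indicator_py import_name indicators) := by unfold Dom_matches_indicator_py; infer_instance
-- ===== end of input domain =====

-- B replaces the forward startswith-scan by ancestor-prefix membership tests (alternative formulation, same cost class).

-- ===== PORT A =====
-- the 'for indicator in indicators' loop of A, with its two early returns
def pvLoopA (import_name : String) : List String → Bool
  | [] => false
  | ind :: rest =>
    if PySem.Str.startswith import_name (ind ++ ".") then true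
    else if PySem.Str.startswith ind (import_name ++ ".") then true
    else pvLoopA import_name rest

def matches_indicator_py (import_name : String) (indicators : List String) : Bool :=
  if indicators.contains import_name then true
  else pvLoopA import_name indicators

-- ===== PORT B =====
-- [import_name[:i] for i, ch in enumerate(import_name) if ch == '.'] ++ [import_name]
def pvPrefixes (import_name : String) : List String :=
  ((PySem.List.enumerate import_name.toList 0).filterMap
    (fun ic => if ic.2 = '.' then some (PySem.Str.slice import_name none (some ic.1)) else none))
  ++ [import_name]

def matches_indicator_py_alt (import_name : String) (indicators : List String) : Bool :=
  if (pvPrefixes import_name).any (fun p => indicators.contains p) then true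
  else
    let dotted := import_name ++ "."
    indicators.any (fun ind => PySem.Str.startswith ind dotted)

-- ===== PRECONDITION & SPEC =====
def Spec_matches_indicator_py (import_name : String) (indicators : List String) (out : Bool) : Prop := out = matches_indicator_py_alt import_name indicators
instance (import_name : String) (indicators : List String) (out : Bool) : Decidable (Spec_matches_indicator_py import_name indicators out) := by unfold Spec_matches_indicator_py; infer_instance

-- ===== CLAIM (what is proved, stated in full; the proofs are below) =====
def Claim_equal_matches_indicator_py : Prop := ∀ (import_name : String) (indicators : List String), Dom_matches_indicator_py import_name indicators → Spec_matches_indicator_py import_name indicators (matches_indicator_py import_name indicators)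

-- ===== LEMMAS AND PROOFS =====

-- A's loop is an 'any' over the two startswith tests
lemma pvLoopA_eq_any (s : String) (inds : List String) :
    pvLoopA s inds
      = inds.any (fun ind => PySem.Str.startswith s (ind ++ ".") || PySem.Str.startswith ind (s ++ ".")) := by
  induction inds with
  | nil => rfl
  | cons ind rest ih =>
    simp only [pvLoopA, List.any_cons, ih]
    by_cases h1 : PySem.Str.startswith s (ind ++ ".") = true <;>
      by_cases h2 : PySem.Str.startswith ind (s ++ ".") = true <;>
      simp [Bool.or_assoc]

-- a list prefix followed by '.' is exactly a take up to a dot position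
lemma append_dot_prefix_iff (l t : List Char) :
    (t ++ ['.']) <+: l ↔ ∃ k, ∃ _ : k < l.length, l[k] = '.' ∧ t = l.take k := by
  constructor
  · rintro ⟨u, hu⟩
    have hl : l = t ++ ('.' :: u) := by simpa using hu.symm
    refine ⟨t.length, ?_, ?_, ?_⟩
    · have := congrArg List.length hu
      simp at this
      omega
    · simp [hl]
    · simp [hl]
  · rintro ⟨k, hk, hdot, ht⟩
    refine ⟨l.drop (k + 1), ?_⟩
    have hdk : l.drop k = '.' :: l.drop (k + 1) := by
      rw [List.drop_eq_getElem_cons hk, hdot]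
    calc (t ++ ['.']) ++ l.drop (k + 1)
        = l.take k ++ l.drop k := by rw [ht, hdk]; simp
      _ = l := List.take_append_drop k l

-- membership in B's prefix list
lemma mem_pvPrefixes (s p : String) :
    p ∈ pvPrefixes s ↔ (p.toList ++ ['.']) <+: s.toList ∨ p = s := by
  rw [append_dot_prefix_iff]
  simp only [pvPrefixes, List.mem_append, List.mem_singleton, List.mem_filterMap,
    PySem.List.mem_enumerate_iff]
  constructor
  · rintro (⟨a, ⟨k, hk, rfl⟩, hf⟩ | rfl)
    · simp only [zero_add] at hf
      by_cases hd : s.toList[k] = '.'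
      · rw [if_pos hd] at hf
        refine Or.inl ⟨k, hk, hd, ?_⟩
        have := congrArg String.toList (Option.some_injective _ hf)
        rw [← this]
        simp [PySem.Str.slice, PySem.List.slice_to_natCast]
      · rw [if_neg hd] at hf; exact absurd hf (by simp)
    · exact Or.inr rfl
  · rintro (⟨k, hk, hd, ht⟩ | rfl)
    · refine Or.inl ⟨(0 + (k : Int), s.toList[k]), ⟨k, hk, rfl⟩, ?_⟩
      rw [if_pos hd]
      congr 1
      apply String.ext
      rw [ht]
      simp [PySem.Str.slice, PySem.List.slice_to_natCast]
    · exact Or.inr rfl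

-- Str.startswith with an appended "." as a list-prefix statement
lemma startswith_dot_iff (s t : String) :
    PySem.Str.startswith s (t ++ ".") = true ↔ (t.toList ++ ['.']) <+: s.toList := by
  rw [PySem.Str.startswith_eq]
  rw [PySem.Chars.startswith_iff]
  simp

-- A as a proposition
lemma A_true_iff (s : String) (inds : List String) :
    matches_indicator_py s inds = true ↔
      s ∈ inds ∨ ∃ ind ∈ inds,
        ((ind.toList ++ ['.']) <+: s.toList ∨ (s.toList ++ ['.']) <+: ind.toList) := by
  rw [matches_indicator_py]
  cases h : inds.contains s with
  | true =>
    have hs : s ∈ inds := by simpa using h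
    simp [hs]
  | false =>
    have hs : s ∉ inds := by simpa using h
    rw [if_neg (by simp only [h, Bool.false_eq_true, not_false_eq_true])]
    simp only [pvLoopA_eq_any, List.any_eq_true, Bool.or_eq_true, startswith_dot_iff]
    simp [hs]

-- B as a proposition
lemma B_true_iff (s : String) (inds : List String) :
    matches_indicator_py_alt s inds = true ↔
      (∃ p ∈ pvPrefixes s, p ∈ inds) ∨ ∃ ind ∈ inds, (s.toList ++ ['.']) <+: ind.toList := by
  rw [matches_indicator_py_alt]
  cases h : (pvPrefixes s).any (fun p => inds.contains p) with
  | true =>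
    have hex : ∃ p ∈ pvPrefixes s, p ∈ inds := by
      obtain ⟨p, hp, hc⟩ := List.any_eq_true.mp h
      exact ⟨p, hp, by simpa using hc⟩
    simp [hex]
  | false =>
    have hno : ¬ ∃ p ∈ pvPrefixes s, p ∈ inds := by
      intro ⟨p, hp, hin⟩
      have hc : (pvPrefixes s).any (fun p => inds.contains p) = true := by
        simp only [List.any_eq_true]
        exact ⟨p, hp, by simpa using hin⟩
      rw [h] at hc
      exact Bool.false_ne_true hc
    rw [if_neg (by simp only [h, Bool.false_eq_true, not_false_eq_true])]
    simp only [List.any_eq_true, startswith_dot_iff]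
    simp [hno]

lemma main_eq (s : String) (inds : List String) :
    matches_indicator_py s inds = matches_indicator_py_alt s inds := by
  rw [Bool.eq_iff_iff, A_true_iff, B_true_iff]
  constructor
  · rintro (hs | ⟨ind, hind, hfwd | hrev⟩)
    · exact Or.inl ⟨s, (mem_pvPrefixes s s).mpr (Or.inr rfl), hs⟩
    · exact Or.inl ⟨ind, (mem_pvPrefixes s ind).mpr (Or.inl hfwd), hind⟩
    · exact Or.inr ⟨ind, hind, hrev⟩
  · rintro (⟨p, hp, hin⟩ | ⟨ind, hind, hrev⟩)
    · rcases (mem_pvPrefixes s p).mp hp with hpre | rfl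
      · exact Or.inr ⟨p, hin, Or.inl hpre⟩
      · exact Or.inl hin
    · exact Or.inr ⟨ind, hind, Or.inr hrev⟩

-- ===== VERDICT (by name: the statement is the Claim_ definition above) =====
theorem matches_indicator_py_spec : Claim_equal_matches_indicator_py := by
  intro s inds _
  unfold Spec_matches_indicator_py
  exact main_eq s inds
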